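-- pv_equiv track=rewrite | github.com/Pranshugoyal/algo-ds-practice | python/Intervals.py | processIntervalFrequencies
-- ===== SOURCE A (Python) =====
-- def processIntervalFrequencies(intervals):
--     start, end = intervals[0][0], intervals[0][1]
--     for interval in intervals:
--         start = min(start, interval[0])
--         end = max(end, interval[1])
--
--     freq = [0]*(end-start+2)
--     s,e = 0,0
--     for i in intervals:
--         s, e = i[0], i[1]
--         freq[s-start] += 1
--         freq[e-start+1] -= 1
--
--     freq.pop()
--     for i in range(1, len(freq)):
--         freq[i] += freq[i-1]
--
--     return (start, freq)
-- ===== SOURCE B (Python) =====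
-- def processIntervalFrequencies(intervals):
--     start, end = intervals[0][0], intervals[0][1]
--     for interval in intervals:
--         start = min(start, interval[0])
--         end = max(end, interval[1])
--
--     freq = []
--     for p in range(start, end + 1):
--         active = 0
--         for i in intervals:
--             if i[0] <= p:
--                 active += 1
--             if i[1] < p:
--                 active -= 1
--         freq.append(active)
--
--     return (start, freq)
-- ===== Notes on version B (the rewrite author's own statement) =====
-- stated objective: alternative
-- what changed: B abandons A's difference-array + pop + in-place prefix-sum passes: for each point of the range it directly counts the intervals already started minus those already ended, appending one cell at a time; Pre_ keeps the inputs where both of A's difference-array writes land at non-negative in-range offsets and excludes those where A raises IndexError or where an interval's end lies below the minimum start minus one, making A's negative Python index wrap around.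
-- outside the precondition, e.g. on processIntervalFrequencies([[5, 9], [4, 1]]): A returns (4, [1, 2, 2, 2, 2, 1]), B returns (4, [0, 1, 1, 1, 1, 1])
import Mathlib
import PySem

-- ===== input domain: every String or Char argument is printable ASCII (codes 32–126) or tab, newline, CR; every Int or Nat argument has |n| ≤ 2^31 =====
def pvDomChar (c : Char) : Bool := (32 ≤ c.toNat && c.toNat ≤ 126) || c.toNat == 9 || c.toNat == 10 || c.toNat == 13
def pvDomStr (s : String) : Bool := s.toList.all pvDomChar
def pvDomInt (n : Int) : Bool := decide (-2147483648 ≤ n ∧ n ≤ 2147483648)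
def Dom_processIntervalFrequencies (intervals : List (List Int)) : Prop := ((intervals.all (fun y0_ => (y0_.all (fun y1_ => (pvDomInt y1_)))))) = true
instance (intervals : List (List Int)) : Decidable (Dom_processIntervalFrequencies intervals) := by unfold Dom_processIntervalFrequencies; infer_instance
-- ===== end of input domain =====

-- B drops A's difference-array + pop + in-place prefix-sum passes and instead counts, for each
-- point of the range, the intervals already started minus those already ended (objective: alternative).

-- ===== PORT A =====
-- xs[i] on Int lists; none = IndexError, unreachable under Pre_
def pvG (xs : List Int) (i : Int) : Int := (PySem.List.pyGet? xs i).getD 0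
-- intervals[i]; none = IndexError, unreachable under Pre_
def pvG2 (xs : List (List Int)) (i : Int) : List Int := (PySem.List.pyGet? xs i).getD []
-- the identical first loop of both Pythons: start = min of interval[0], end = max of interval[1],
-- seeded from intervals[0][0], intervals[0][1]
def pvStartEnd (intervals : List (List Int)) : Int × Int :=
  intervals.foldl (fun p i => (min p.1 (pvG i 0), max p.2 (pvG i 1)))
    (pvG (pvG2 intervals 0) 0, pvG (pvG2 intervals 0) 1)
-- freq[v] += d ; out-of-range = IndexError, unreachable under Pre_
def pvBump (f : List Int) (v d : Int) : List Int :=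
  PySem.List.pySetD f v (PySem.List.pyGetD f v 0 + d)

def processIntervalFrequencies (intervals : List (List Int)) : Int × List Int :=
  let se := pvStartEnd intervals
  let start := se.1
  let freq0 := PySem.List.pyRepeat [(0 : Int)] (se.2 - start + 2)
  let freq1 := intervals.foldl
    (fun f i => pvBump (pvBump f (pvG i 0 - start) 1) (pvG i 1 - start + 1) (-1)) freq0
  -- freq.pop(); none = IndexError on the empty list, unreachable under Pre_
  let freq2 := ((PySem.List.pop? freq1 (-1)).getD (0, freq1)).2
  let freq3 := (PySem.List.pyRange 1 (freq2.length : Int) 1).foldl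
    (fun f i => pvBump f i (PySem.List.pyGetD f (i - 1) 0)) freq2
  (start, freq3)

-- ===== PORT B =====
def processIntervalFrequencies_alt (intervals : List (List Int)) : Int × List Int :=
  let se := pvStartEnd intervals
  let start := se.1
  let freq := (PySem.List.pyRange start (se.2 + 1) 1).foldl
    (fun acc p => acc ++ [intervals.foldl (fun a i =>
        let a1 := if pvG i 0 ≤ p then a + 1 else a
        if pvG i 1 < p then a1 - 1 else a1) 0]) []
  (start, freq)

-- ===== PRECONDITION & SPEC =====
-- Pre_ keeps the inputs where both of A's difference-array writes land at non-negative
-- in-range offsets: a non-empty list of intervals with at least two entries, each start at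
-- most the maximum end plus one and each end at least the minimum start minus one. Outside
-- it A raises IndexError or, when an interval's end lies below the minimum start minus one,
-- A's write at a negative Python index wraps around and A returns a value with that
-- decrement silently applied inside the kept array.
def Pre_processIntervalFrequencies (intervals : List (List Int)) : Prop :=
  intervals ≠ [] ∧ ∀ i ∈ intervals, 2 ≤ i.length ∧
    (∃ i' ∈ intervals, i.getD 0 0 ≤ i'.getD 1 0 + 1) ∧
    (∃ i' ∈ intervals, i'.getD 0 0 ≤ i.getD 1 0 + 1)
instance (intervals : List (List Int)) : Decidable (Pre_processIntervalFrequencies intervals) := by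
  unfold Pre_processIntervalFrequencies; infer_instance

def pvWitness_processIntervalFrequencies : List (List Int) := [[1, 3], [2, 5]]

def Spec_processIntervalFrequencies (intervals : List (List Int)) (out : Int × List Int) : Prop :=
  out = processIntervalFrequencies_alt intervals
instance (intervals : List (List Int)) (out : Int × List Int) :
    Decidable (Spec_processIntervalFrequencies intervals out) := by
  unfold Spec_processIntervalFrequencies; infer_instance

-- ===== CLAIM (what is proved, stated in full; the proofs are below) =====
def Claim_equal_processIntervalFrequencies : Prop :=
  ∀ (intervals : List (List Int)), Dom_processIntervalFrequencies intervals →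
    Pre_processIntervalFrequencies intervals →
    Spec_processIntervalFrequencies intervals (processIntervalFrequencies intervals)

-- ===== LEMMAS AND PROOFS =====

-- partial sums of a Nat-indexed Int function: g 0 + … + g j
def pvPS (g : Nat → Int) (j : Nat) : Int := ((List.range (j + 1)).map g).sum

lemma pvPS_zero (g : Nat → Int) : pvPS g 0 = g 0 := by simp [pvPS]

lemma pvPS_succ (g : Nat → Int) (j : Nat) : pvPS g (j + 1) = pvPS g j + g (j + 1) := by
  simp [pvPS, List.range_succ]; ring

lemma pvPS_pred (g : Nat → Int) (m : Nat) (h : 1 ≤ m) : pvPS g m = pvPS g (m - 1) + g m := by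
  obtain ⟨k, rfl⟩ : ∃ k, m = k + 1 := ⟨m - 1, by omega⟩
  simp [pvPS_succ]

lemma pvPS_congr (p q : Nat → Int) (j : Nat) (h : ∀ k, k ≤ j → p k = q k) :
    pvPS p j = pvPS q j := by
  unfold pvPS
  congr 1
  apply List.map_congr_left
  intro k hk
  have := List.mem_range.mp hk
  exact h k (by omega)

lemma pvPS_add (p q : Nat → Int) (j : Nat) :
    pvPS (fun k => p k + q k) j = pvPS p j + pvPS q j := by
  induction j with
  | zero => simp [pvPS_zero]
  | succ j ih => rw [pvPS_succ, pvPS_succ, pvPS_succ, ih]; ring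

-- partial sums of a point indicator: 1 once the point has been passed
lemma pvPS_indicator (v c : Int) (hv : 0 ≤ v) (j : Nat) :
    pvPS (fun k => if v = (k : Int) then c else 0) j = if v ≤ (j : Int) then c else 0 := by
  induction j with
  | zero => rw [pvPS_zero]; split_ifs <;> simp_all <;> omega
  | succ j ih =>
    rw [pvPS_succ, ih]
    split_ifs <;> push_cast at * <;> omega

-- summing pvPS over the list commutes with summing pointwise
lemma pvPS_sum_comm (h : List Int → Nat → Int) (L : List (List Int)) (j : Nat) :
    pvPS (fun k => (L.map (fun i => h i k)).sum) j = (L.map (fun i => pvPS (h i) j)).sum := by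
  induction L with
  | nil => simp [pvPS]
  | cons a t ih =>
    simp only [List.map_cons, List.sum_cons]
    rw [← ih, ← pvPS_add]

lemma pySetD_neg_one_set (f : List Int) (v : Int) (h : f ≠ []) :
    PySem.List.pySetD f (-1) v = f.set (f.length - 1) v := by
  have hl : 0 < f.length := List.length_pos_iff.mpr h
  simp only [PySem.List.pySetD, PySem.List.pySet?, PySem.List.pyIdx?]
  rw [if_neg (by omega), if_pos (by omega)]
  simp

-- writing at Python index -1 changes no cell below the last one
lemma pvBump_getD_neg_one (f : List Int) (d : Int) (hne : f ≠ []) (j : Nat) (hj : j + 1 < f.length) :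
    (pvBump f (-1) d).getD j 0 = f.getD j 0 := by
  rw [pvBump, pySetD_neg_one_set _ _ hne]
  simp only [List.getD, List.getElem?_set]
  split_ifs <;> simp_all <;> omega

lemma pvBump_length (f : List Int) (v d : Int) : (pvBump f v d).length = f.length := by
  simp [pvBump, PySem.List.length_pySetD]

lemma pvBump_getD (f : List Int) (v d : Int) (h0 : 0 ≤ v) (h1 : v < (f.length : Int)) (j : Nat) :
    (pvBump f v d).getD j 0 = f.getD j 0 + if (j : Int) = v then d else 0 := by
  rw [pvBump, PySem.List.pySetD_of_nonneg f _ h0, PySem.List.pyGetD_eq_getElem f 0 h0 h1]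
  have hv : v.toNat < f.length := by omega
  simp only [List.getD, List.getElem?_set]
  split_ifs with h2 h3 h4 <;> simp_all <;> omega

-- A's second loop: two difference-array bumps per interval, pointwise effect
lemma foldl_diff_getD (a b : List Int → Int) (l : List (List Int)) (f0 : List Int)
    (h : ∀ i ∈ l, 0 ≤ a i ∧ a i < (f0.length : Int) ∧ -1 ≤ b i ∧ b i < (f0.length : Int)) :
    (l.foldl (fun f i => pvBump (pvBump f (a i) 1) (b i) (-1)) f0).length = f0.length ∧
    ∀ j : Nat, j + 1 < f0.length →
      (l.foldl (fun f i => pvBump (pvBump f (a i) 1) (b i) (-1)) f0).getD j 0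
      = f0.getD j 0 + (l.map (fun i =>
          (if a i = (j : Int) then (1:Int) else 0) + (if b i = (j : Int) then (-1:Int) else 0))).sum := by
  induction l generalizing f0 with
  | nil => simp
  | cons i t ih =>
    have hi := h i (by simp)
    have hlen : (pvBump (pvBump f0 (a i) 1) (b i) (-1)).length = f0.length := by
      rw [pvBump_length, pvBump_length]
    have ht : ∀ x ∈ t, 0 ≤ a x ∧ a x < ((pvBump (pvBump f0 (a i) 1) (b i) (-1)).length : Int) ∧
        -1 ≤ b x ∧ b x < ((pvBump (pvBump f0 (a i) 1) (b i) (-1)).length : Int) := by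
      rw [hlen]; exact fun x hx => h x (by simp [hx])
    obtain ⟨ihl, ihg⟩ := ih _ ht
    constructor
    · rw [List.foldl_cons, ihl, hlen]
    · intro j hj
      rw [List.foldl_cons, ihg j (by rw [hlen]; exact hj)]
      simp only [List.map_cons, List.sum_cons]
      have he : ∀ c v : Int, (if (j:Int) = v then c else 0) = (if v = (j:Int) then c else 0) := by
        intro c v; split_ifs <;> simp_all
      rcases eq_or_ne (b i) (-1) with hb | hb
      · have hne' : pvBump f0 (a i) 1 ≠ [] := by
          intro hnil
          have hl2 := pvBump_length f0 (a i) 1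
          rw [hnil] at hl2
          simp at hl2
          omega
        rw [hb, pvBump_getD_neg_one _ _ hne' j (by rw [pvBump_length]; omega),
            pvBump_getD _ _ _ hi.1 hi.2.1,
            if_neg (show ¬ ((-1:Int) = (j:Int)) by omega), he]
        ring
      · have hb0 : 0 ≤ b i := by omega
        rw [pvBump_getD _ _ _ hb0 (by rw [pvBump_length]; exact_mod_cast hi.2.2.2),
            pvBump_getD _ _ _ hi.1 hi.2.1, he, he]
        ring

-- A's third loop: in-place prefix sums over range(1, len(f))
lemma prefix_loop_aux (f : List Int) (m : Nat) (hm : m ≤ f.length) :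
    ((PySem.List.pyRange 1 (m : Int) 1).foldl (fun f i => pvBump f i (PySem.List.pyGetD f (i - 1) 0)) f).length
      = f.length ∧
    ∀ j : Nat, j < f.length →
      ((PySem.List.pyRange 1 (m : Int) 1).foldl (fun f i => pvBump f i (PySem.List.pyGetD f (i - 1) 0)) f).getD j 0
        = if j < m then pvPS (fun k => f.getD k 0) j else f.getD j 0 := by
  induction m with
  | zero =>
    rw [PySem.List.pyRange_one_eq_nil (by omega)]
    exact ⟨rfl, fun j hj => by simp⟩
  | succ m ih =>
    by_cases hm1 : m = 0
    · subst hm1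
      rw [show ((1:Nat) : Int) = 1 by rfl, PySem.List.pyRange_one_eq_nil (by omega)]
      refine ⟨rfl, fun j hj => ?_⟩
      simp only [List.foldl_nil]
      by_cases hj0 : j < 1
      · have : j = 0 := by omega
        subst this
        simp [pvPS]
      · rw [if_neg hj0]
    · obtain ⟨ihl, ihg⟩ := ih (by omega)
      rw [show ((m + 1 : Nat) : Int) = (m : Int) + 1 by push_cast; ring,
          PySem.List.pyRange_one_succ_right (by omega), List.foldl_append]
      set r := (PySem.List.pyRange 1 (m : Int) 1).foldl (fun f i => pvBump f i (PySem.List.pyGetD f (i - 1) 0)) f with hr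
      simp only [List.foldl_cons, List.foldl_nil]
      have hmr : ((m : Int) - 1) = ((m - 1 : Nat) : Int) := by omega
      have hget : PySem.List.pyGetD r ((m : Int) - 1) 0 = pvPS (fun k => f.getD k 0) (m - 1) := by
        rw [hmr, PySem.List.pyGetD_natCast, ihg (m - 1) (by omega), if_pos (by omega)]
      constructor
      · rw [pvBump_length, ihl]
      · intro j hj
        rw [hget, pvBump_getD _ _ _ (by omega) (by rw [ihl]; exact_mod_cast by omega), ihg j hj]
        by_cases hjm : (j : Int) = (m : Int)
        · have hjm' : j = m := by omega
          subst hjm'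
          rw [if_pos hjm, if_neg (by omega), if_pos (by omega), pvPS_pred _ j (by omega)]
          ring
        · rw [if_neg hjm]
          by_cases h1 : j < m
          · rw [if_pos h1, if_pos (by omega)]; ring
          · rw [if_neg h1, if_neg (by omega)]; ring

lemma getD_replicate_zero (n j : Nat) : (List.replicate n (0:Int)).getD j 0 = 0 := by
  simp [List.getD, List.getElem?_replicate]
  split_ifs <;> rfl

lemma pvG_zero (xs : List Int) : pvG xs 0 = xs.getD 0 0 := by
  simp [pvG, PySem.List.pyGet?_zero, List.getD]

lemma pvG_one (xs : List Int) : pvG xs 1 = xs.getD 1 0 := by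
  rw [pvG, PySem.List.pyGet?_of_nonneg xs (by omega)]
  simp [List.getD]

lemma pvStartEnd_spec (l : List (List Int)) :
    ∀ i ∈ l, (pvStartEnd l).1 ≤ pvG i 0 ∧ pvG i 1 ≤ (pvStartEnd l).2 := by
  have hmin := PySem.List.foldl_min_le (l.map (fun i => pvG i 0)) (pvG (pvG2 l 0) 0)
  have hmax := PySem.List.le_foldl_max (l.map (fun i => pvG i 1)) (pvG (pvG2 l 0) 1)
  rw [List.foldl_map] at hmin hmax
  have hse : pvStartEnd l = (List.foldl (fun x i => min x (pvG i 0)) (pvG (pvG2 l 0) 0) l,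
      List.foldl (fun x i => max x (pvG i 1)) (pvG (pvG2 l 0) 1) l) := by
    unfold pvStartEnd
    rw [PySem.List.foldl_prod_mk (f := fun x i => min x (pvG i 0)) (g := fun x i => max x (pvG i 1))]
  rw [hse]
  refine fun i hi => ⟨?_, ?_⟩
  · exact hmin.2 _ (List.mem_map_of_mem hi)
  · exact hmax.2 _ (List.mem_map_of_mem hi)

-- B's inner loop: intervals started at p minus intervals ended before p
lemma inner_count (l : List (List Int)) (p : Int) (c : Int) :
    l.foldl (fun a i =>
        let a1 := if pvG i 0 ≤ p then a + 1 else a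
        if pvG i 1 < p then a1 - 1 else a1) c
      = c + (l.map (fun i =>
          (if pvG i 0 ≤ p then (1:Int) else 0) + (if pvG i 1 < p then (-1:Int) else 0))).sum := by
  induction l generalizing c with
  | nil => simp
  | cons i t ih =>
    rw [List.foldl_cons, ih]
    simp only [List.map_cons, List.sum_cons]
    split_ifs <;> ring

theorem main_eq (l : List (List Int)) (hne : l ≠ [])
    (hall : ∀ i ∈ l, 2 ≤ i.length ∧
      (∃ i' ∈ l, i.getD 0 0 ≤ i'.getD 1 0 + 1) ∧ (∃ i' ∈ l, i'.getD 0 0 ≤ i.getD 1 0 + 1)) :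
    processIntervalFrequencies l = processIntervalFrequencies_alt l := by
  obtain ⟨i0, t, rfl⟩ := List.exists_cons_of_ne_nil hne
  set L := i0 :: t with hL
  have hbounds := pvStartEnd_spec L
  set st := (pvStartEnd L).1 with hst
  set en := (pvStartEnd L).2 with hen
  have hmem0 : i0 ∈ L := by rw [hL]; exact List.mem_cons_self ..
  have hhigh : ∀ i ∈ L, pvG i 0 ≤ en + 1 := by
    intro i hi
    obtain ⟨i', hi', hle⟩ := (hall i hi).2.1
    have h1 := (hbounds i' hi').2
    rw [pvG_one] at h1
    rw [pvG_zero]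
    omega
  have hlow : ∀ i ∈ L, st - 1 ≤ pvG i 1 := by
    intro i hi
    obtain ⟨i', hi', hle⟩ := (hall i hi).2.2
    have h1 := (hbounds i' hi').1
    rw [pvG_zero] at h1
    rw [pvG_one]
    omega
  have hstle : st ≤ en + 1 := by
    have h1 := (hbounds i0 hmem0).1
    have h2 := hhigh i0 hmem0
    omega
  set N := (en - st + 1).toNat with hN
  have hNi : ((N : Nat) : Int) = en - st + 1 := by rw [hN]; omega
  -- ===== A side =====
  have hrepA : PySem.List.pyRepeat [(0:Int)] (en - st + 2) = List.replicate (N + 1) (0:Int) := by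
    rw [PySem.List.pyRepeat_singleton]
    congr 1
    omega
  have hbA : ∀ i ∈ L, 0 ≤ pvG i 0 - st ∧ pvG i 0 - st < ((List.replicate (N+1) (0:Int)).length : Int)
      ∧ -1 ≤ pvG i 1 - st + 1 ∧ pvG i 1 - st + 1 < ((List.replicate (N+1) (0:Int)).length : Int) := by
    intro i hi
    have h1 := (hbounds i hi).1
    have h2 := (hbounds i hi).2
    have h3 := hhigh i hi
    have h4 := hlow i hi
    simp only [List.length_replicate]
    omega
  obtain ⟨hl1, hg1⟩ := foldl_diff_getD (fun i => pvG i 0 - st) (fun i => pvG i 1 - st + 1) L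
    (List.replicate (N+1) (0:Int)) hbA
  set F1 := L.foldl (fun f i => pvBump (pvBump f (pvG i 0 - st) 1) (pvG i 1 - st + 1) (-1))
    (List.replicate (N+1) (0:Int)) with hF1
  have hF1len : F1.length = N + 1 := by rw [hl1, List.length_replicate]
  have hF1ne : F1 ≠ [] := by
    intro hnil
    rw [hnil] at hF1len
    simp at hF1len
  have hpop : PySem.List.pop? F1 (-1) = some (F1.getLast hF1ne, F1.dropLast) := by
    conv_lhs => rw [← List.dropLast_append_getLast hF1ne]
    exact PySem.List.pop?_last _ _
  have hdroplen : F1.dropLast.length = N := by rw [List.length_dropLast, hF1len]; omega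
  have hdrop : ∀ k : Nat, k < N → F1.dropLast.getD k 0 = F1.getD k 0 := by
    intro k hk
    have h1 : k < F1.dropLast.length := by omega
    have h2 : k < F1.length := by omega
    rw [List.getD_eq_getElem _ _ h1, List.getD_eq_getElem _ _ h2, List.getElem_dropLast]
  obtain ⟨hl3, hg3⟩ := prefix_loop_aux F1.dropLast F1.dropLast.length (le_refl _)
  set F3 := (PySem.List.pyRange 1 ((F1.dropLast.length : Nat) : Int) 1).foldl
    (fun f i => pvBump f i (PySem.List.pyGetD f (i - 1) 0)) F1.dropLast with hF3
  have hF3len : F3.length = N := by rw [hl3, hdroplen]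
  have hAget : ∀ j : Nat, j < N → F3.getD j 0 = pvPS (fun k => (L.map (fun i =>
      (if pvG i 0 - st = (k : Int) then (1:Int) else 0)
      + (if pvG i 1 - st + 1 = (k : Int) then (-1:Int) else 0))).sum) j := by
    intro j hj
    rw [hg3 j (by omega), if_pos (by omega)]
    apply pvPS_congr
    intro k hk
    rw [hdrop k (by omega), hg1 k (by rw [List.length_replicate]; omega), getD_replicate_zero, zero_add]
  -- ===== B side =====
  have hB : (PySem.List.pyRange st (en + 1) 1).foldl
      (fun acc p => acc ++ [L.foldl (fun a i =>
        let a1 := if pvG i 0 ≤ p then a + 1 else a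
        if pvG i 1 < p then a1 - 1 else a1) 0]) []
      = (List.range N).map (fun (j : Nat) => (L.map (fun i =>
          (if pvG i 0 ≤ st + (j : Int) then (1:Int) else 0)
          + (if pvG i 1 < st + (j : Int) then (-1:Int) else 0))).sum) := by
    rw [PySem.List.foldl_append_singleton_eq_map, List.nil_append,
        PySem.List.pyRange_one, show (en + 1 - st).toNat = N by omega, List.map_map]
    apply List.map_congr_left
    intro j _
    simp only [Function.comp]
    rw [inner_count, zero_add]
  -- the two result lists agree pointwise
  have hlists : F3 = (List.range N).map (fun (j : Nat) => (L.map (fun i =>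
      (if pvG i 0 ≤ st + (j : Int) then (1:Int) else 0)
      + (if pvG i 1 < st + (j : Int) then (-1:Int) else 0))).sum) := by
    apply List.ext_getElem
    · rw [hF3len, List.length_map, List.length_range]
    · intro j hj1 hj2
      have hjN : j < N := by rw [hF3len] at hj1; exact hj1
      rw [← List.getD_eq_getElem F3 0 hj1, hAget j hjN]
      rw [List.getElem_map, List.getElem_range]
      rw [pvPS_sum_comm (fun i k => (if pvG i 0 - st = (k : Int) then (1:Int) else 0)
        + (if pvG i 1 - st + 1 = (k : Int) then (-1:Int) else 0)) L j]
      apply congrArg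
      apply List.map_congr_left
      intro i hi
      have h1 := (hbounds i hi).1
      have h4 := hlow i hi
      rw [pvPS_add, pvPS_indicator _ _ (by omega), pvPS_indicator _ _ (by omega)]
      split_ifs <;> omega
  -- ===== assemble =====
  unfold processIntervalFrequencies processIntervalFrequencies_alt
  dsimp only
  rw [← hst, ← hen, hrepA, ← hF1, hpop]
  dsimp only [Option.getD_some]
  rw [← hF3, hB, hlists]

-- ===== VERDICT (by name: the statement is the Claim_ definition above) =====
theorem processIntervalFrequencies_spec : Claim_equal_processIntervalFrequencies := by
  intro intervals _ hpre
  unfold Pre_processIntervalFrequencies at hpre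
  unfold Spec_processIntervalFrequencies
  exact main_eq intervals hpre.1 hpre.2
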